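-- pv_equiv track=rewrite | github.com/wojciechGaudnik/CodeWars | Python/kyu6OddHeavyArray.py | is_odd_heavy
-- ===== SOURCE A (Python) =====
-- def is_odd_heavy(arr):
--     odd = sorted([e for e in arr if e % 2 != 0], reverse=False)
--     even = sorted([e for e in arr if e % 2 == 0], reverse=True)
--     if not odd:
--         return False
--     if not even:
--         return True
--     oddMax = odd[0]
--     evenMin = even[0]
--     return oddMax > evenMin
-- ===== SOURCE B (Python) =====
-- def is_odd_heavy(arr):
--     odds = [e for e in arr if e % 2 != 0]
--     evens = [e for e in arr if e % 2 == 0]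
--     return bool(odds) and all(o > e for o in odds for e in evens)
-- ===== Notes on version B (the rewrite author's own statement) =====
-- stated objective: alternative
-- what changed: Replaces the two sorts plus head extraction by the direct all-pairs quantifier 'every odd exceeds every even' over the two partitions, with no sorting or min/max selection.
import Mathlib
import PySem

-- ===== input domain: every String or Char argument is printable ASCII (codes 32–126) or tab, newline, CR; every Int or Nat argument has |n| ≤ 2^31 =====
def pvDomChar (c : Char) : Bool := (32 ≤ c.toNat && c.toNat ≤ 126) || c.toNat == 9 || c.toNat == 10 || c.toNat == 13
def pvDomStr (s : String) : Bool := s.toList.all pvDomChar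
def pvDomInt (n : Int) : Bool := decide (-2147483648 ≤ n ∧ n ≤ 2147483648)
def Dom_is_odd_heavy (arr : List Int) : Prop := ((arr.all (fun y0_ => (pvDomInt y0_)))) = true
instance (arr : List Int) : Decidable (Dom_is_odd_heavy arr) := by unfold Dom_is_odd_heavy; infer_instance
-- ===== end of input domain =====

-- B replaces A's two sorts and head picks with the direct all-pairs test "every odd exceeds every even" (alternative decomposition, no speed claim).

-- ===== PORT A =====
def is_odd_heavy (arr : List Int) : Bool :=
  let odd := PySem.List.sorted (arr.filter (fun e => PySem.Int.mod e 2 != 0)) (fun x => x) false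
  let even := PySem.List.sorted (arr.filter (fun e => PySem.Int.mod e 2 == 0)) (fun x => x) true
  match odd, even with
  | [], _ => false
  | _ :: _, [] => true
  | oddMax :: _, evenMin :: _ => decide (oddMax > evenMin)

-- ===== PORT B =====
def is_odd_heavy_alt (arr : List Int) : Bool :=
  let odds := arr.filter (fun e => PySem.Int.mod e 2 != 0)
  let evens := arr.filter (fun e => PySem.Int.mod e 2 == 0)
  !odds.isEmpty && odds.all (fun o => evens.all (fun e => decide (o > e)))

-- ===== PRECONDITION & SPEC =====
def Spec_is_odd_heavy (arr : List Int) (out : Bool) : Prop := out = is_odd_heavy_alt arr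
instance (arr : List Int) (out : Bool) : Decidable (Spec_is_odd_heavy arr out) := by unfold Spec_is_odd_heavy; infer_instance

-- ===== CLAIM (what is proved, stated in full; the proofs are below) =====
def Claim_equal_is_odd_heavy : Prop := ∀ (arr : List Int), Dom_is_odd_heavy arr → Spec_is_odd_heavy arr (is_odd_heavy arr)

-- ===== LEMMAS AND PROOFS =====

-- ===== VERDICT (by name: the statement is the Claim_ definition above) =====
theorem is_odd_heavy_spec : Claim_equal_is_odd_heavy := by
  intro arr _
  unfold Spec_is_odd_heavy is_odd_heavy is_odd_heavy_alt
  set odds := arr.filter (fun e => PySem.Int.mod e 2 != 0) with hodds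
  set evens := arr.filter (fun e => PySem.Int.mod e 2 == 0) with hevens
  rcases hso : PySem.List.sorted odds (fun x => x) false with _ | ⟨om, ot⟩
  · have : odds = [] := (PySem.List.sorted_eq_nil_iff odds (fun x => x) false).mp hso
    simp [this]
  · have homem : om ∈ odds := by
      have := PySem.List.mem_sorted odds (fun x => x) false om
      rw [hso] at this; exact this.mp (List.mem_cons_self ..)
    have hone : odds ≠ [] := by intro h; rw [h] at homem; exact absurd homem (List.not_mem_nil)
    have homin : ∀ y ∈ odds, om ≤ y := PySem.List.key_head_sorted_le odds (fun x => x) hso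
    rcases hse : PySem.List.sorted evens (fun x => x) true with _ | ⟨em, et⟩
    · have : evens = [] := (PySem.List.sorted_eq_nil_iff evens (fun x => x) true).mp hse
      simp [this, hone]
    · have hemem : em ∈ evens := by
        have := PySem.List.mem_sorted evens (fun x => x) true em
        rw [hse] at this; exact this.mp (List.mem_cons_self ..)
      have hemax : ∀ y ∈ evens, y ≤ em := PySem.List.key_head_sorted_rev_ge evens (fun x => x) hse
      have hne : odds.isEmpty = false := by simp [hone]
      show decide (om > em) = (!odds.isEmpty && odds.all fun o => evens.all fun e => decide (o > e))
      rw [hne, Bool.not_false, Bool.true_and]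
      symm
      by_cases h : om > em
      · rw [decide_eq_true h, List.all_eq_true]
        intro o ho
        rw [List.all_eq_true]
        intro e he
        exact decide_eq_true (lt_of_le_of_lt (hemax e he) (lt_of_lt_of_le h (homin o ho)))
      · rw [decide_eq_false h, List.all_eq_false]
        refine ⟨om, homem, ?_⟩
        rw [Bool.not_eq_true, List.all_eq_false]
        exact ⟨em, hemem, by simpa using not_lt.mp h⟩
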